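-- pv_equiv track=rewrite | github.com/CorvaeOboro/ultima_online_razor_enhanced_python_scripts | scripts/ITEM_runebook_reorder_runes.py | order_runes
-- ===== SOURCE A (Python) =====
-- PREFERRED_RUNE_PATTERNS = {
--     "Bank": ["bank"],
--     "Home": ["home", "house"],
--     "OgreValley": ["ogre", "ogrevalley"],
--     "Gnoll": ["gnoll"],
--     "StygianKeep": ["stygian"],
--     "WhiteStoneCastle": ["white"],
--     "FrozenIsle": ["frozen"],
-- }
--
-- PREFERRED_BUCKET_ORDER = [
--     "Bank",
--     "Home",
--     "OgreValley",
--     "Gnoll",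
--     "StygianKeep",
--     "WhiteStoneCastle",
--     "FrozenIsle",
-- ]
--
-- ADD_UNMATCHED_RUNES_AT_END = False
--
-- def _to_str(v):
--     try:
--         return str(v) if v is not None else ""
--     except Exception:
--         return ""
--
-- def _norm(s):
--     s = _to_str(s).strip().lower()
--     s = " ".join(s.split())
--     return s
--
-- def match_priority_bucket(entry):
--     match_text_norm = entry.get("match_text_norm", "") or entry.get("name_norm", "")
--     if not match_text_norm:
--         return None
--
--     bucket_order = list(PREFERRED_BUCKET_ORDER or [])
--     for k in (PREFERRED_RUNE_PATTERNS or {}).keys():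
--         if k not in bucket_order:
--             bucket_order.append(k)
--
--     for bucket_name in bucket_order:
--         patterns = (PREFERRED_RUNE_PATTERNS or {}).get(bucket_name, [])
--         for p in (patterns or []):
--             p_norm = _norm(p)
--             if p_norm and (p_norm in match_text_norm):
--                 return bucket_name
--
--     return None
--
-- def order_runes(entries):
--     used = set()
--     ordered = []
--
--     bucket_order = list(PREFERRED_BUCKET_ORDER or [])
--     for k in (PREFERRED_RUNE_PATTERNS or {}).keys():
--         if k not in bucket_order:
--             bucket_order.append(k)
--
--     bucketed = {k: [] for k in bucket_order}
--     unmatched = []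
--
--     for e in entries:
--         b = match_priority_bucket(e)
--         if b is None:
--             unmatched.append(e)
--         else:
--             bucketed[b].append(e)
--
--     for bucket_name in bucket_order:
--         group = bucketed.get(bucket_name, [])
--         group.sort(key=lambda x: x.get("name_norm", ""))
--         for e in group:
--             if e["serial"] in used:
--                 continue
--             used.add(e["serial"])
--             ordered.append(e)
--
--     if ADD_UNMATCHED_RUNES_AT_END:
--         unmatched.sort(key=lambda x: x.get("name_norm", ""))
--         for e in unmatched:
--             if e["serial"] in used:
--                 continue
--             used.add(e["serial"])
--             ordered.append(e)
--
--     return ordered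
-- ===== SOURCE B (Python) =====
-- PREFERRED_RUNE_PATTERNS = {
--     "Bank": ["bank"],
--     "Home": ["home", "house"],
--     "OgreValley": ["ogre", "ogrevalley"],
--     "Gnoll": ["gnoll"],
--     "StygianKeep": ["stygian"],
--     "WhiteStoneCastle": ["white"],
--     "FrozenIsle": ["frozen"],
-- }
--
-- PREFERRED_BUCKET_ORDER = [
--     "Bank",
--     "Home",
--     "OgreValley",
--     "Gnoll",
--     "StygianKeep",
--     "WhiteStoneCastle",
--     "FrozenIsle",
-- ]
--
-- # Flat (pattern, bucket-rank) table: since buckets are ranked in order, the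
-- # first bucket with a matching pattern is the one of MINIMAL rank among all
-- # matching patterns, so no per-bucket structure is needed at all.
-- _PATTERN_RANKS = [
--     ("bank", 0),
--     ("home", 1), ("house", 1),
--     ("ogre", 2), ("ogrevalley", 2),
--     ("gnoll", 3),
--     ("stygian", 4),
--     ("white", 5),
--     ("frozen", 6),
-- ]
--
-- def _text(e):
--     return e.get("match_text_norm") or e.get("name_norm") or ""
--
-- def _rank(t):
--     best = None
--     for p, r in _PATTERN_RANKS:
--         if p in t:
--             best = r if best is None else min(best, r)
--     return best
--
-- def order_runes(entries):
--     decorated = []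
--     for e in entries:
--         r = _rank(_text(e))
--         if r is not None:
--             decorated.append((r, e.get("name_norm") or "", e))
--     decorated.sort(key=lambda t: (t[0], t[1]))
--     seen = set()
--     out = []
--     for _, _, e in decorated:
--         s = e["serial"]
--         if s not in seen:
--             seen.add(s)
--             out.append(e)
--     return out
-- ===== Notes on version B (the rewrite author's own statement) =====
-- stated objective: simpler
-- what changed: Replaces the bucket dict, per-bucket pattern matcher and per-bucket sorts with a flat (pattern, rank) table whose minimal matching rank is each entry's key, one stable global sort by (rank, name), and a single dedup pass over serials.
import Mathlib
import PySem

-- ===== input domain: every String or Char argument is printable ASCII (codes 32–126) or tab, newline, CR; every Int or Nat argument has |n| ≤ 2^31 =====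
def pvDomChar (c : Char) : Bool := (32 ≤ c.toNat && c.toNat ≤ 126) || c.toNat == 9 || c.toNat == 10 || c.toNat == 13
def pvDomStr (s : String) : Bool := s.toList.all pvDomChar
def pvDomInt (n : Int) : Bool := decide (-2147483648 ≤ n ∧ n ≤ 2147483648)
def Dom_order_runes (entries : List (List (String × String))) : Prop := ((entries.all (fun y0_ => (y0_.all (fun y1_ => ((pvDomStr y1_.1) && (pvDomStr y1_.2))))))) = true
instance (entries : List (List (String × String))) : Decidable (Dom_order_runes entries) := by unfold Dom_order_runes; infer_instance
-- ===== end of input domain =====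

-- B replaces A's bucket dict, per-bucket matcher and per-bucket sorts by a flat
-- (pattern, rank) table with minimal-matching-rank keys, one stable global sort
-- by (rank, name) and a single dedup pass (objective: simpler).

-- ===== PORT A =====
def pvNorm (s : String) : String :=
  PySem.Str.join " " (PySem.Str.split₀ (PySem.Str.lower (PySem.Str.strip s)))

def pvPatterns : PySem.Dict String (List String) :=
  PySem.Dict.mk [("Bank", ["bank"]), ("Home", ["home", "house"]),
    ("OgreValley", ["ogre", "ogrevalley"]), ("Gnoll", ["gnoll"]),
    ("StygianKeep", ["stygian"]), ("WhiteStoneCastle", ["white"]),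
    ("FrozenIsle", ["frozen"])]

def pvPreferredBucketOrder : List String :=
  ["Bank", "Home", "OgreValley", "Gnoll", "StygianKeep", "WhiteStoneCastle", "FrozenIsle"]

def pvBucketOrder : List String :=
  pvPatterns.keys.foldl (fun bo k => if bo.contains k then bo else bo ++ [k]) pvPreferredBucketOrder

-- entry.get("match_text_norm", "") or entry.get("name_norm", "")
def pvMatchText (e : List (String × String)) : String :=
  let m := (PySem.Dict.mk e).getD "match_text_norm" ""
  if m = "" then (PySem.Dict.mk e).getD "name_norm" "" else m

def match_priority_bucket (e : List (String × String)) : Option String :=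
  let t := pvMatchText e
  if t = "" then none
  else pvBucketOrder.findSome? (fun b =>
    if (pvPatterns.getD b []).any (fun p => pvNorm p != "" && PySem.Str.isIn (pvNorm p) t)
    then some b else none)

def pvAddUnmatchedAtEnd : Bool := false   -- ADD_UNMATCHED_RUNES_AT_END

-- x.get("name_norm", "") (the sort key)
def pvName (e : List (String × String)) : String := (PySem.Dict.mk e).getD "name_norm" ""

-- e["serial"]; a missing key is a Python KeyError, excluded by Pre_ (the default is never read there)
def pvSerial (e : List (String × String)) : String := (PySem.Dict.mk e).getD "serial" ""

-- the dedup loop body of A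
def pvDedupStep (acc : PySem.Set String × List (List (String × String)))
    (e : List (String × String)) : PySem.Set String × List (List (String × String)) :=
  if PySem.Set.contains acc.1 (pvSerial e) then acc
  else (PySem.Set.add acc.1 (pvSerial e), acc.2 ++ [e])

def order_runes (entries : List (List (String × String))) : List (List (String × String)) :=
  let bucketed0 : PySem.Dict String (List (List (String × String))) :=
    pvBucketOrder.foldl (fun d k => d.insert k []) PySem.Dict.empty
  let st := entries.foldl
    (fun (st : PySem.Dict String (List (List (String × String))) × List (List (String × String))) e =>
      match match_priority_bucket e with
      | none => (st.1, st.2 ++ [e])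
      | some b => (st.1.modify b [] (fun g => g ++ [e]), st.2))
    (bucketed0, [])
  let res := pvBucketOrder.foldl
    (fun acc b => (PySem.List.sorted (st.1.getD b []) pvName false).foldl pvDedupStep acc)
    ((PySem.Set.empty : PySem.Set String), [])
  if pvAddUnmatchedAtEnd then
    ((PySem.List.sorted st.2 pvName false).foldl pvDedupStep res).2
  else res.2

-- ===== PORT B =====
-- _PATTERN_RANKS: flat (pattern, bucket-rank) table
def pvPatternRanks : List (String × Int) :=
  [("bank", 0), ("home", 1), ("house", 1), ("ogre", 2), ("ogrevalley", 2),
   ("gnoll", 3), ("stygian", 4), ("white", 5), ("frozen", 6)]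

-- x or y (Python truthiness on strings / Optional strings)
def pvOrS (o : Option String) (d : String) : String :=
  match o with
  | some s => if s = "" then d else s
  | none => d

-- _text(e) = e.get("match_text_norm") or e.get("name_norm") or ""
def pvTextB (e : List (String × String)) : String :=
  pvOrS ((PySem.Dict.mk e).get? "match_text_norm") (pvOrS ((PySem.Dict.mk e).get? "name_norm") "")

-- _rank(t): minimal rank among matching flat patterns, none if no match
def pvRankB (t : String) : Option Int :=
  pvPatternRanks.foldl
    (fun best pr =>
      if PySem.Str.isIn pr.1 t then
        match best with
        | none => some pr.2
        | some m => some (min m pr.2)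
      else best)
    none

def order_runes_alt (entries : List (List (String × String))) : List (List (String × String)) :=
  let decorated := entries.foldl
    (fun (acc : List (Int × String × List (String × String))) e =>
      match pvRankB (pvTextB e) with
      | none => acc
      | some r => acc ++ [(r, pvOrS ((PySem.Dict.mk e).get? "name_norm") "", e)])
    []
  let ds := PySem.List.sorted2 decorated (fun t => t.1) (fun t => t.2.1) false
  (ds.foldl
    (fun (st : PySem.Set String × List (List (String × String))) t =>
      -- e["serial"]; a missing key is a Python KeyError, excluded by Pre_
      let s := pvOrS ((PySem.Dict.mk t.2.2).get? "serial") ""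
      if PySem.Set.contains st.1 s then st
      else (PySem.Set.add st.1 s, st.2 ++ [t.2.2]))
    ((PySem.Set.empty : PySem.Set String), [])).2

-- ===== PRECONDITION & SPEC =====
-- an entry whose text (match_text_norm, else name_norm) contains one of the pattern words
def pvMatches (e : List (String × String)) : Bool :=
  ["bank", "home", "house", "ogre", "gnoll", "stygian", "white", "frozen"].any
    (fun p => PySem.Str.isIn p (pvMatchText e))

-- Pre_ excludes exactly the inputs on which the Python A raises KeyError:
-- an entry that matches a bucket but has no "serial" key (B raises the same KeyError there).
def Pre_order_runes (entries : List (List (String × String))) : Prop :=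
  ∀ e ∈ entries, pvMatches e = true → (PySem.Dict.mk e).contains "serial" = true
instance (entries : List (List (String × String))) : Decidable (Pre_order_runes entries) := by
  unfold Pre_order_runes; infer_instance

def pvWitness_order_runes : (List (List (String × String))) :=
  [[("name_norm", "bank"), ("serial", "1")]]

def Spec_order_runes (entries : List (List (String × String))) (out : List (List (String × String))) : Prop := out = order_runes_alt entries
instance (entries : List (List (String × String))) (out : List (List (String × String))) : Decidable (Spec_order_runes entries out) := by unfold Spec_order_runes; infer_instance

-- ===== CLAIM (what is proved, stated in full; the proofs are below) =====
def Claim_equal_order_runes : Prop := ∀ (entries : List (List (String × String))), Dom_order_runes entries → Pre_order_runes entries → Spec_order_runes entries (order_runes entries)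

-- ===== LEMMAS AND PROOFS =====

-- proof-side rank of a bucket name (B's table collapses buckets to these ranks)
def pvBRank (b : String) : Int :=
  if b = "Bank" then 0 else if b = "Home" then 1 else if b = "OgreValley" then 2
  else if b = "Gnoll" then 3 else if b = "StygianKeep" then 4
  else if b = "WhiteStoneCastle" then 5 else 6

def pvRkOf (e : List (String × String)) : Int :=
  match match_priority_bucket e with
  | some b => pvBRank b
  | none => 0

def pvTag (e : List (String × String)) : Int × String × List (String × String) :=
  (pvRkOf e, pvName e, e)

def pvRs : List Int := [0, 1, 2, 3, 4, 5, 6]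

-- ---- B's helpers agree with A's accessors ----

theorem pv_orS_getD (e : List (String × String)) (k : String) :
    pvOrS ((PySem.Dict.mk e).get? k) "" = (PySem.Dict.mk e).getD k "" := by
  unfold pvOrS PySem.Dict.getD
  cases (PySem.Dict.mk e).get? k with
  | none => rfl
  | some s => by_cases h : s = "" <;> simp [h]

theorem pv_textB_eq (e : List (String × String)) : pvTextB e = pvMatchText e := by
  unfold pvTextB pvMatchText
  rw [pv_orS_getD]
  cases h : (PySem.Dict.mk e).get? "match_text_norm" with
  | none => simp [pvOrS, PySem.Dict.getD, h]
  | some s =>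
      by_cases hs : s = "" <;> simp [pvOrS, PySem.Dict.getD, h, hs]

-- ---- B's min-rank matcher equals A's first-bucket matcher ----

theorem pv_rank_match (t : String) :
    pvRankB t = Option.map pvBRank
      (if t = "" then none
       else pvBucketOrder.findSome? (fun b =>
        if (pvPatterns.getD b []).any (fun p => pvNorm p != "" && PySem.Str.isIn (pvNorm p) t)
        then some b else none)) := by
  by_cases ht : t = ""
  · subst ht; decide
  · simp only [if_neg ht]
    have hbo : pvBucketOrder = pvPreferredBucketOrder := by decide
    rw [hbo]
    simp only [pvPreferredBucketOrder, List.findSome?]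
    rw [show pvPatterns.getD "Bank" [] = ["bank"] from by decide,
        show pvPatterns.getD "Home" [] = ["home", "house"] from by decide,
        show pvPatterns.getD "OgreValley" [] = ["ogre", "ogrevalley"] from by decide,
        show pvPatterns.getD "Gnoll" [] = ["gnoll"] from by decide,
        show pvPatterns.getD "StygianKeep" [] = ["stygian"] from by decide,
        show pvPatterns.getD "WhiteStoneCastle" [] = ["white"] from by decide,
        show pvPatterns.getD "FrozenIsle" [] = ["frozen"] from by decide]
    simp only [List.any_cons, List.any_nil]
    simp only [show pvNorm "bank" = "bank" from by decide,
        show pvNorm "home" = "home" from by decide,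
        show pvNorm "house" = "house" from by decide,
        show pvNorm "ogre" = "ogre" from by decide,
        show pvNorm "ogrevalley" = "ogrevalley" from by decide,
        show pvNorm "gnoll" = "gnoll" from by decide,
        show pvNorm "stygian" = "stygian" from by decide,
        show pvNorm "white" = "white" from by decide,
        show pvNorm "frozen" = "frozen" from by decide]
    simp only [pvRankB, pvPatternRanks, List.foldl_cons, List.foldl_nil]
    generalize PySem.Str.isIn "bank" t = b1
    generalize PySem.Str.isIn "home" t = b2
    generalize PySem.Str.isIn "house" t = b3
    generalize PySem.Str.isIn "ogre" t = b4
    generalize PySem.Str.isIn "ogrevalley" t = b5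
    generalize PySem.Str.isIn "gnoll" t = b6
    generalize PySem.Str.isIn "stygian" t = b7
    generalize PySem.Str.isIn "white" t = b8
    generalize PySem.Str.isIn "frozen" t = b9
    revert b1 b2 b3 b4 b5 b6 b7 b8 b9
    decide

theorem pv_rankB_eq (e : List (String × String)) :
    pvRankB (pvTextB e) = Option.map pvBRank (match_priority_bucket e) := by
  rw [pv_textB_eq]
  unfold match_priority_bucket
  exact pv_rank_match (pvMatchText e)

-- ---- generic list lemmas ----

theorem pv_insertBy_map {α β : Type} (before : β → β → Bool) (f : α → β) (x : α) :
    ∀ ys : List α, PySem.List.insertBy before (f x) (ys.map f)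
      = (PySem.List.insertBy (fun a b => before (f a) (f b)) x ys).map f := by
  intro ys
  induction ys with
  | nil => rfl
  | cons y ys ih =>
      simp only [List.map_cons, PySem.List.insertBy]
      by_cases h : before (f x) (f y) = true
      · simp [h]
      · simp [h, ih]

theorem pv_foldl_insertBy_map {α β : Type} (before : β → β → Bool) (f : α → β) :
    ∀ (xs ys : List α),
      (xs.map f).foldl (fun acc x => PySem.List.insertBy before x acc) (ys.map f)
        = (xs.foldl (fun acc x => PySem.List.insertBy (fun a b => before (f a) (f b)) x acc) ys).map f := by
  intro xs
  induction xs with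
  | nil => intro ys; rfl
  | cons x xs ih =>
      intro ys
      simp only [List.map_cons, List.foldl_cons]
      rw [pv_insertBy_map]
      exact ih _

theorem pv_sorted2_map {α β : Type} (k1 : β → Int) (k2 : β → String) (f : α → β) (xs : List α) :
    PySem.List.sorted2 (xs.map f) k1 k2 false
      = (PySem.List.sorted2 xs (fun x => k1 (f x)) (fun x => k2 (f x)) false).map f := by
  simp only [PySem.List.sorted2]
  exact pv_foldl_insertBy_map _ f xs []

theorem pv_insertBy_append_skip {α : Type} (before : α → α → Bool) (x : α) :
    ∀ (ys zs : List α), (∀ y ∈ ys, before x y = false) →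
      PySem.List.insertBy before x (ys ++ zs) = ys ++ PySem.List.insertBy before x zs := by
  intro ys
  induction ys with
  | nil => intro zs _; rfl
  | cons y ys ih =>
      intro zs h
      simp only [List.cons_append, PySem.List.insertBy]
      have hy : before x y = false := h y (by simp)
      simp [hy, ih zs (fun y hy => h y (by simp [hy]))]

theorem pv_insertBy_append_within {α : Type} (before before' : α → α → Bool) (x : α) :
    ∀ (ys zs : List α), (∀ y ∈ ys, before x y = before' x y) → (∀ z ∈ zs, before x z = true) →
      PySem.List.insertBy before x (ys ++ zs) = (PySem.List.insertBy before' x ys) ++ zs := by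
  intro ys
  induction ys with
  | nil =>
      intro zs _ hz
      cases zs with
      | nil => rfl
      | cons z zs => simp [PySem.List.insertBy, hz z (by simp)]
  | cons y ys ih =>
      intro zs hy hz
      simp only [List.cons_append, PySem.List.insertBy]
      have h1 : before x y = before' x y := hy y (by simp)
      by_cases h : before' x y = true
      · simp [h1, h]
      · simp only [h1, h]
        simp [ih zs (fun y hy' => hy y (by simp [hy'])) hz]

theorem pv_sorted_append {α : Type} (key : α → String) (xs : List α) (x : α) :
    PySem.List.sorted (xs ++ [x]) key false
      = PySem.List.insertBy (fun a b => decide (key a < key b)) x (PySem.List.sorted xs key false) := by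
  rw [PySem.List.sorted_eq_foldl_insertBy, PySem.List.sorted_eq_foldl_insertBy, List.foldl_append]
  rfl

def pvLexB {α : Type} (k1 : α → Int) (k2 : α → String) (a b : α) : Bool :=
  decide (k1 a < k1 b) || !decide (k1 b < k1 a) && decide (k2 a < k2 b)

theorem pv_sorted2_eq_foldl {α : Type} (k1 : α → Int) (k2 : α → String) (xs : List α) :
    PySem.List.sorted2 xs k1 k2 false
      = xs.foldl (fun acc x => PySem.List.insertBy (pvLexB k1 k2) x acc) [] := by
  rfl

theorem pv_insertBy_blocks {α : Type} (k1 : α → Int) (k2 : α → String) (x : α) (F : Int → List α) :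
    ∀ rs : List Int, rs.Pairwise (· < ·) → k1 x ∈ rs →
      (∀ r ∈ rs, ∀ y ∈ F r, k1 y = r) →
      PySem.List.insertBy (pvLexB k1 k2) x (rs.map F).flatten
        = (rs.map (fun r => if r = k1 x
            then PySem.List.insertBy (fun a b => decide (k2 a < k2 b)) x (F r)
            else F r)).flatten := by
  intro rs
  induction rs with
  | nil => intro _ hx _; simp at hx
  | cons r rest ih =>
      intro hpw hx hF
      have hrest : ∀ r' ∈ rest, r < r' := by
        intro r' hr'; exact (List.pairwise_cons.mp hpw).1 r' hr'
      simp only [List.map_cons, List.flatten_cons]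
      by_cases hr : r = k1 x
      · have hz : ∀ z ∈ (rest.map F).flatten, pvLexB k1 k2 x z = true := by
          intro z hz
          rcases List.mem_flatten.mp hz with ⟨l, hl, hzl⟩
          rcases List.mem_map.mp hl with ⟨r', hr', rfl⟩
          have hk : k1 z = r' := hF r' (by simp [hr']) z hzl
          have : k1 x < k1 z := by rw [hk, ← hr]; exact hrest r' hr'
          simp [pvLexB, this]
        have hy : ∀ y ∈ F r, pvLexB k1 k2 x y = (fun a b => decide (k2 a < k2 b)) x y := by
          intro y hyF
          have hk : k1 y = r := hF r (by simp) y hyF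
          have h1 : ¬ k1 x < k1 y := by rw [hk, ← hr]; exact lt_irrefl _
          have h2 : ¬ k1 y < k1 x := by rw [hk, ← hr]; exact lt_irrefl _
          simp [pvLexB, h1, h2]
        rw [pv_insertBy_append_within (pvLexB k1 k2) (fun a b => decide (k2 a < k2 b)) x (F r)
          (rest.map F).flatten hy hz]
        have hrestF : (rest.map (fun r' => if r' = k1 x
            then PySem.List.insertBy (fun a b => decide (k2 a < k2 b)) x (F r')
            else F r')) = rest.map F := by
          apply List.map_congr_left
          intro r' hr'
          have : r' ≠ k1 x := by
            intro hc; rw [← hr] at hc; exact absurd hc (ne_of_gt (hrest r' hr'))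
          simp [this]
        simp only [hrestF, if_pos hr]
      · have hx' : k1 x ∈ rest := by
          rcases List.mem_cons.mp hx with h | h
          · exact absurd h.symm hr
          · exact h
        have hy : ∀ y ∈ F r, pvLexB k1 k2 x y = false := by
          intro y hyF
          have hk : k1 y = r := hF r (by simp) y hyF
          have hlt : k1 y < k1 x := by
            rw [hk]; exact hrest _ hx'
          have h1 : ¬ k1 x < k1 y := lt_asymm hlt
          simp [pvLexB, h1, hlt]
        rw [pv_insertBy_append_skip _ x (F r) (rest.map F).flatten hy]
        rw [ih (List.pairwise_cons.mp hpw).2 hx' (fun r' h' y hy' => hF r' (by simp [h']) y hy')]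
        simp [hr]

theorem pv_sorted2_blocks {α : Type} (k1 : α → Int) (k2 : α → String)
    (rs : List Int) (hpw : rs.Pairwise (· < ·)) :
    ∀ xs : List α, (∀ x ∈ xs, k1 x ∈ rs) →
      PySem.List.sorted2 xs k1 k2 false
        = (rs.map (fun r => PySem.List.sorted (xs.filter (fun x => k1 x == r)) k2 false)).flatten := by
  intro xs
  induction xs using List.reverseRecOn with
  | nil => intro _; simp [PySem.List.sorted2, PySem.List.sorted]
  | append_singleton xs x ih =>
      intro hall
      have hx : k1 x ∈ rs := hall x (by simp)
      have hxs : ∀ y ∈ xs, k1 y ∈ rs := fun y hy => hall y (by simp [hy])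
      rw [pv_sorted2_eq_foldl, List.foldl_append]
      simp only [List.foldl_cons, List.foldl_nil]
      rw [← pv_sorted2_eq_foldl, ih hxs]
      rw [pv_insertBy_blocks k1 k2 x
        (fun r => PySem.List.sorted (xs.filter (fun x => k1 x == r)) k2 false) rs hpw hx
        (by
          intro r _ y hy
          have h1 := (PySem.List.mem_sorted _ _ _ _).mp hy
          exact eq_of_beq (List.mem_filter.mp h1).2)]
      apply congrArg
      apply List.map_congr_left
      intro r _
      by_cases hr : r = k1 x
      · have hf : (xs ++ [x]).filter (fun y => k1 y == r) = xs.filter (fun y => k1 y == r) ++ [x] := by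
          simp [List.filter_append, hr]
        rw [hf, pv_sorted_append, if_pos hr]
      · have hf : (xs ++ [x]).filter (fun y => k1 y == r) = xs.filter (fun y => k1 y == r) := by
          have : (k1 x == r) = false := by simp [Ne.symm hr]
          simp [List.filter_append, this]
        rw [hf, if_neg hr]

-- ---- facts about the fixed bucket tables ----

theorem pv_bucketOrder_eq : pvBucketOrder = pvPreferredBucketOrder := by decide

theorem pv_mb_mem {e : List (String × String)} {b : String}
    (h : match_priority_bucket e = some b) : b ∈ pvPreferredBucketOrder := by
  rw [← pv_bucketOrder_eq]
  unfold match_priority_bucket at h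
  by_cases ht : pvMatchText e = ""
  · simp [ht] at h
  · simp only [ht, if_false] at h
    rcases List.findSome?_eq_some_iff.mp h with ⟨l₁, a, l₂, hsplit, ha, _⟩
    have hba : b = a := by
      by_cases hc : ((pvPatterns.getD a []).any
          (fun p => pvNorm p != "" && PySem.Str.isIn (pvNorm p) (pvMatchText e))) = true
      · rw [if_pos hc] at ha; exact (Option.some.inj ha).symm
      · rw [if_neg hc] at ha; exact absurd ha (by simp)
    rw [hba, hsplit]; simp

theorem pv_rank_mem : ∀ b ∈ pvPreferredBucketOrder, pvBRank b ∈ pvRs := by decide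

theorem pv_rank_inj : ∀ b ∈ pvPreferredBucketOrder, ∀ b' ∈ pvPreferredBucketOrder,
    pvBRank b = pvBRank b' → b = b' := by decide

theorem pv_rs_eq_map : pvRs = pvPreferredBucketOrder.map pvBRank := by decide

theorem pv_rs_pairwise : pvRs.Pairwise (· < ·) := by decide

-- ---- A's bucketed dict characterised as a filter ----

theorem pv_pairFold_fst (entries : List (List (String × String))) :
    ∀ (d : PySem.Dict String (List (List (String × String)))) (un : List (List (String × String))),
      (entries.foldl
        (fun st e =>
          match match_priority_bucket e with
          | none => (st.1, st.2 ++ [e])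
          | some b => (st.1.modify b [] (fun g => g ++ [e]), st.2))
        (d, un)).1
      = entries.foldl
          (fun d e =>
            match match_priority_bucket e with
            | none => d
            | some b => d.modify b [] (fun g => g ++ [e]))
          d := by
  induction entries with
  | nil => intro d un; rfl
  | cons e es ih =>
      intro d un
      simp only [List.foldl_cons]
      cases h : match_priority_bucket e with
      | none => exact ih d (un ++ [e])
      | some b => exact ih _ un

theorem pv_dictFold_eq_filterMap (entries : List (List (String × String))) :
    ∀ d : PySem.Dict String (List (List (String × String))),
      entries.foldl
        (fun d e =>
          match match_priority_bucket e with
          | none => d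
          | some b => d.modify b [] (fun g => g ++ [e]))
        d
      = (entries.filterMap (fun e => (match_priority_bucket e).map (fun b => (b, e)))).foldl
          (fun d p => d.modify p.1 [] (fun g => g ++ [p.2])) d := by
  induction entries with
  | nil => intro d; rfl
  | cons e es ih =>
      intro d
      simp only [List.foldl_cons, List.filterMap_cons]
      cases h : match_priority_bucket e with
      | none => simp only [Option.map_none]; exact ih d
      | some b => simp only [Option.map_some, List.foldl_cons]; exact ih _

theorem pv_bucketed0_getD (b : String) :
    (pvBucketOrder.foldl (fun d k => d.insert k ([] : List (List (String × String))))
      PySem.Dict.empty).getD b [] = [] := by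
  rw [pv_bucketOrder_eq]
  simp only [pvPreferredBucketOrder, List.foldl_cons, List.foldl_nil]
  simp [PySem.Dict.getD_insert]

theorem pv_filterMap_filter (b : String) (entries : List (List (String × String))) :
    ((entries.filterMap (fun e => (match_priority_bucket e).map (fun b' => (b', e)))).filter
      (fun p => p.1 == b)).map (fun p => p.2)
    = entries.filter (fun e => match_priority_bucket e == some b) := by
  induction entries with
  | nil => rfl
  | cons e es ih =>
      cases h : match_priority_bucket e with
      | none => simp [h, List.filterMap_cons_none, ih]
      | some b' =>
          by_cases hb : b' = b
          · simp [h, List.filterMap_cons_some, hb, ih]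
          · simp [h, List.filterMap_cons_some, hb, ih]

theorem pv_bucketed_getD (entries : List (List (String × String))) (b : String) :
    ((entries.foldl
        (fun st e =>
          match match_priority_bucket e with
          | none => (st.1, st.2 ++ [e])
          | some b => (st.1.modify b [] (fun g => g ++ [e]), st.2))
        (pvBucketOrder.foldl (fun d k => d.insert k []) PySem.Dict.empty, [])).1).getD b []
    = entries.filter (fun e => match_priority_bucket e == some b) := by
  rw [pv_pairFold_fst, pv_dictFold_eq_filterMap, PySem.Dict.getD_foldl_modify_append,
    pv_bucketed0_getD, pv_filterMap_filter]
  simp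

-- ---- B's decorated list characterised ----

theorem pv_ranked_eq (entries : List (List (String × String))) :
    ∀ acc : List (Int × String × List (String × String)),
      entries.foldl
        (fun acc e =>
          match pvRankB (pvTextB e) with
          | none => acc
          | some r => acc ++ [(r, pvOrS ((PySem.Dict.mk e).get? "name_norm") "", e)])
        acc
      = acc ++ (entries.filter (fun e => (match_priority_bucket e).isSome)).map pvTag := by
  induction entries with
  | nil => intro acc; simp
  | cons e es ih =>
      intro acc
      simp only [List.foldl_cons]
      cases h : match_priority_bucket e with
      | none =>
          have hr : pvRankB (pvTextB e) = none := by rw [pv_rankB_eq, h]; rfl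
          simp only [hr]
          rw [ih]; simp [h]
      | some b =>
          have hr : pvRankB (pvTextB e) = some (pvBRank b) := by rw [pv_rankB_eq, h]; rfl
          simp only [hr]
          rw [ih]
          simp [h, pvTag, pvRkOf, pvName, pv_orS_getD]

theorem pv_filter_rank (entries : List (List (String × String))) (b : String)
    (hb : b ∈ pvPreferredBucketOrder) :
    (entries.filter (fun e => (match_priority_bucket e).isSome)).filter
      (fun e => pvRkOf e == pvBRank b)
    = entries.filter (fun e => match_priority_bucket e == some b) := by
  rw [List.filter_filter]
  apply List.filter_congr
  intro e _
  cases h : match_priority_bucket e with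
  | none => simp [h, pvRkOf]
  | some b' =>
      have hb' : b' ∈ pvPreferredBucketOrder := pv_mb_mem h
      by_cases hbb : b' = b
      · simp [h, pvRkOf, hbb]
      · have : pvBRank b' ≠ pvBRank b := by
          intro hc; exact hbb (pv_rank_inj b' hb' b hb hc)
        simp [h, pvRkOf, this, hbb]

-- ---- assembling both sides ----

theorem pv_A_eq (entries : List (List (String × String))) :
    order_runes entries
      = (((pvPreferredBucketOrder.map (fun b =>
            PySem.List.sorted (entries.filter (fun e => match_priority_bucket e == some b))
              pvName false)).flatten).foldl pvDedupStep (PySem.Set.empty, [])).2 := by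
  unfold order_runes
  simp only [pvAddUnmatchedAtEnd, Bool.false_eq_true, if_false]
  simp only [pv_bucketed_getD]
  rw [pv_bucketOrder_eq, List.foldl_flatten, List.foldl_map]

theorem pv_stepB_eq (st : PySem.Set String × List (List (String × String)))
    (e : List (String × String)) :
    (let s := pvOrS ((PySem.Dict.mk e).get? "serial") ""
     if PySem.Set.contains st.1 s then st
     else (PySem.Set.add st.1 s, st.2 ++ [e])) = pvDedupStep st e := by
  simp only [pv_orS_getD]
  rfl

theorem pv_B_eq (entries : List (List (String × String))) :
    order_runes_alt entries
      = ((PySem.List.sorted2 (entries.filter (fun e => (match_priority_bucket e).isSome))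
            pvRkOf pvName false).foldl pvDedupStep (PySem.Set.empty, [])).2 := by
  unfold order_runes_alt
  rw [pv_ranked_eq entries []]
  simp only [List.nil_append]
  rw [pv_sorted2_map]
  have htag : (fun x => pvTag x |>.1) = pvRkOf := rfl
  have htag2 : (fun x => (pvTag x).2.1) = pvName := rfl
  simp only [htag, htag2]
  rw [List.foldl_map]
  simp only [pv_stepB_eq]
  rfl

theorem pv_main (entries : List (List (String × String))) :
    order_runes entries = order_runes_alt entries := by
  have hall : ∀ x ∈ entries.filter (fun e => (match_priority_bucket e).isSome), pvRkOf x ∈ pvRs := by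
    intro x hx
    have hsome := (List.mem_filter.mp hx).2
    cases h : match_priority_bucket x with
    | none => rw [h] at hsome; simp at hsome
    | some b =>
        have hb := pv_mb_mem h
        simp only [pvRkOf, h]
        exact pv_rank_mem b hb
  have hList : PySem.List.sorted2 (entries.filter (fun e => (match_priority_bucket e).isSome))
      pvRkOf pvName false
      = (pvPreferredBucketOrder.map (fun b =>
          PySem.List.sorted (entries.filter (fun e => match_priority_bucket e == some b))
            pvName false)).flatten := by
    rw [pv_sorted2_blocks pvRkOf pvName pvRs pv_rs_pairwise
      (entries.filter (fun e => (match_priority_bucket e).isSome)) hall]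
    rw [pv_rs_eq_map, List.map_map]
    refine congrArg List.flatten (List.map_congr_left ?_)
    intro b hb
    simp only [Function.comp_apply]
    rw [pv_filter_rank entries b hb]
  rw [pv_A_eq, pv_B_eq, hList]

-- ===== VERDICT (by name: the statement is the Claim_ definition above) =====
theorem order_runes_spec : Claim_equal_order_runes := by
  intro entries _ _
  unfold Spec_order_runes
  exact pv_main entries
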